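-- pv_equiv track=rewrite | github.com/tnndbtc/pipe | code/http/gen_vo_manifest.py | _resolve_style
-- ===== SOURCE A (Python) =====
-- STYLE_FALLBACK: dict[str, list[str]] = {
--     "angry":    ["angry",    "shouting",   "unfriendly", "serious"],
--     "fearful":  ["fearful",  "terrified",  "whispering", "sad"],
--     "cheerful": ["cheerful", "excited",    "friendly",   "hopeful"],
--     "sad":      ["sad",      "disgruntled"],
--     "excited":  ["excited",  "cheerful",   "friendly"],
--     "serious":  ["serious",  "calm"],
-- }
--
-- NARRATOR_PREFERRED = ["narration-professional", "newscast"]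
--
-- def _resolve_style(
--     desired_style: str | None,
--     available_styles: list[str],
--     speaker_id: str,
-- ) -> str | None:
--     """
--     Select the best azure_style for a VO line.
--
--     Priority:
--       1. desired_style (from action field) if in available_styles
--       2. Walk desired_style through fallback chains
--       3. For "narrator" speaker: prefer narration-professional / newscast
--       4. None if nothing matches
--     """
--     if not available_styles:
--         return None
--
--     avail = set(available_styles)
--
--     # Narrator preference (applied regardless of desired_style)
--     if speaker_id == "narrator":
--         for pref in NARRATOR_PREFERRED:
--             if pref in avail:
--                 return pref
--
--     # If a specific style was requested, try it and its fallback chain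
--     if desired_style:
--         # Direct match
--         if desired_style in avail:
--             return desired_style
--         # Walk the fallback chain for the desired emotion
--         chain = STYLE_FALLBACK.get(desired_style, [desired_style])
--         for candidate in chain:
--             if candidate in avail:
--                 return candidate
--
--     # No match
--     return None
-- ===== SOURCE B (Python) =====
-- STYLE_FALLBACK: dict[str, list[str]] = {
--     "angry":    ["angry",    "shouting",   "unfriendly", "serious"],
--     "fearful":  ["fearful",  "terrified",  "whispering", "sad"],
--     "cheerful": ["cheerful", "excited",    "friendly",   "hopeful"],
--     "sad":      ["sad",      "disgruntled"],
--     "excited":  ["excited",  "cheerful",   "friendly"],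
--     "serious":  ["serious",  "calm"],
-- }
--
-- NARRATOR_PREFERRED = ["narration-professional", "newscast"]
--
-- def _resolve_style(desired_style, available_styles, speaker_id):
--     # Inverted search: instead of probing candidates against the available set,
--     # scan the AVAILABLE styles once, ranking each by its priority position,
--     # and keep the one with the lowest (best) rank.
--     priority = []
--     if speaker_id == "narrator":
--         priority += NARRATOR_PREFERRED
--     if desired_style:
--         priority.append(desired_style)
--         priority += STYLE_FALLBACK.get(desired_style, [desired_style])
--     best_rank = None
--     best_style = None
--     for style in available_styles:
--         if style in priority:
--             rank = priority.index(style)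
--             if best_rank is None or rank < best_rank:
--                 best_rank, best_style = rank, style
--     return best_style
-- ===== Notes on version B (the rewrite author's own statement) =====
-- stated objective: alternative
-- what changed: B inverts the search direction: instead of probing each priority candidate against an available-styles set, it makes a single pass over available_styles, ranks each style by its position in the priority list, and keeps the lowest-ranked one (an argmin scan instead of sequential candidate probing).
import Mathlib
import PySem

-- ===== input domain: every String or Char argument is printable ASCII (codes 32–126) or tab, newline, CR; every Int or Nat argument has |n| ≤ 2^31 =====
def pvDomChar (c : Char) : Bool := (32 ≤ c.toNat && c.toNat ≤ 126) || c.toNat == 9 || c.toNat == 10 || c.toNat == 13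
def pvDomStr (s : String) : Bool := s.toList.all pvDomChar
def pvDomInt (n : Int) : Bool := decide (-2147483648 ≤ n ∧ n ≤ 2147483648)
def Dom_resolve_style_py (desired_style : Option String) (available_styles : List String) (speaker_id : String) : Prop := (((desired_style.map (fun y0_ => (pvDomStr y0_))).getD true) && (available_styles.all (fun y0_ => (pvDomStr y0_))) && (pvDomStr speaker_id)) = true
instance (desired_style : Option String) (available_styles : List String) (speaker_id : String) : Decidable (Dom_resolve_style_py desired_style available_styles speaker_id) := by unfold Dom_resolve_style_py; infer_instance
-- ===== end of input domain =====

-- B inverts the search: instead of probing the priority candidates against the available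
-- set, it scans available_styles once, ranking each by priority position, and keeps the
-- best-ranked one (objective: alternative algorithm, same cost on these tiny lists).

-- ===== PORT A =====
def STYLE_FALLBACK : PySem.Dict String (List String) :=
  PySem.Dict.ofList
    [("angry",    ["angry",    "shouting",   "unfriendly", "serious"]),
     ("fearful",  ["fearful",  "terrified",  "whispering", "sad"]),
     ("cheerful", ["cheerful", "excited",    "friendly",   "hopeful"]),
     ("sad",      ["sad",      "disgruntled"]),
     ("excited",  ["excited",  "cheerful",   "friendly"]),
     ("serious",  ["serious",  "calm"])]

def NARRATOR_PREFERRED : List String := ["narration-professional", "newscast"]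

def resolve_style_py (desired_style : Option String) (available_styles : List String) (speaker_id : String) : Option String :=
  if available_styles = [] then none
  else
    let avail : PySem.Set String := PySem.Set.ofList available_styles
    -- for pref in NARRATOR_PREFERRED: if pref in avail: return pref
    let narr : Option String :=
      if speaker_id = "narrator" then
        NARRATOR_PREFERRED.find? (fun pref => PySem.Set.contains avail pref)
      else none
    match narr with
    | some pref => some pref
    | none =>
      match desired_style with
      | none => none
      | some ds =>
        if ds = "" then none
        else if PySem.Set.contains avail ds then some ds
        else
          let chain := PySem.Dict.getD STYLE_FALLBACK ds [ds]
          chain.find? (fun candidate => PySem.Set.contains avail candidate)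

-- ===== PORT B =====
def resolve_style_py_alt (desired_style : Option String) (available_styles : List String) (speaker_id : String) : Option String :=
  let priority : List String :=
    (if speaker_id = "narrator" then NARRATOR_PREFERRED else []) ++
    (match desired_style with
     | some ds => if ds = "" then [] else ds :: PySem.Dict.getD STYLE_FALLBACK ds [ds]
     | none => [])
  -- best_rank/best_style pair, scanning the available styles once
  let best : Option (Nat × String) :=
    available_styles.foldl (fun b style =>
      if priority.contains style then
        match PySem.List.index? priority style with
        | some rank =>
          match b with
          | none => some (rank, style)
          | some (br, bs) => if rank < br then some (rank, style) else some (br, bs)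
        | none => b
      else b) none
  best.map (·.2)

-- ===== PRECONDITION & SPEC =====
def Spec_resolve_style_py (desired_style : Option String) (available_styles : List String) (speaker_id : String) (out : Option String) : Prop := out = resolve_style_py_alt desired_style available_styles speaker_id
instance (desired_style : Option String) (available_styles : List String) (speaker_id : String) (out : Option String) : Decidable (Spec_resolve_style_py desired_style available_styles speaker_id out) := by unfold Spec_resolve_style_py; infer_instance

-- ===== CLAIM (what is proved, stated in full; the proofs are below) =====
def Claim_equal_resolve_style_py : Prop := ∀ (desired_style : Option String) (available_styles : List String) (speaker_id : String), Dom_resolve_style_py desired_style available_styles speaker_id → Spec_resolve_style_py desired_style available_styles speaker_id (resolve_style_py desired_style available_styles speaker_id)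

-- ===== LEMMAS AND PROOFS =====

-- leftmost-min merge of two optional (rank, style) pairs
def pvMerge : Option (Nat × String) → Option (Nat × String) → Option (Nat × String)
  | none, o => o
  | some p, none => some p
  | some p, some q => if q.1 < p.1 then some q else some p

-- the contribution of one available style
def pvH (cs : List String) (x : String) : Option (Nat × String) :=
  (PySem.List.index? cs x).map (fun r => (r, x))

-- min of two optional indices
def pvOMin : Option Nat → Option Nat → Option Nat
  | none, o => o
  | some i, none => some i
  | some i, some j => some (min i j)

theorem pvMerge_none_right (a : Option (Nat × String)) : pvMerge a none = a := by
  cases a <;> rfl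

theorem pvMerge_assoc (a b c : Option (Nat × String)) :
    pvMerge (pvMerge a b) c = pvMerge a (pvMerge b c) := by
  rcases c with _ | ⟨k, u⟩
  · rw [pvMerge_none_right, pvMerge_none_right]
  · rcases b with _ | ⟨j, t⟩
    · rw [pvMerge_none_right]
      rfl
    · rcases a with _ | ⟨i, s⟩
      · rfl
      · by_cases h1 : j < i <;> by_cases h2 : k < j <;> by_cases h3 : k < i <;>
          simp [pvMerge, h1, h2, h3] <;> first | rfl | omega | (exfalso; omega)

theorem pvStep_eq (cs : List String) (b : Option (Nat × String)) (x : String) :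
    (if cs.contains x then
       match PySem.List.index? cs x with
       | some rank =>
         match b with
         | none => some (rank, x)
         | some (br, bs) => if rank < br then some (rank, x) else some (br, bs)
       | none => b
     else b) = pvMerge b (pvH cs x) := by
  by_cases h : x ∈ cs
  · have hc : cs.contains x = true := by simpa using h
    obtain ⟨r, hi⟩ : ∃ r, PySem.List.index? cs x = some r :=
      Option.isSome_iff_exists.mp ((PySem.List.index?_isSome_iff cs x).mpr h)
    unfold pvH
    rw [hi]
    cases b <;> simp [hc, h, pvMerge]
  · have hc : cs.contains x = false := by simpa using h
    have hi : PySem.List.index? cs x = none := (PySem.List.index?_eq_none_iff cs x).mpr h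
    unfold pvH
    rw [hi]
    cases b <;> simp [hc, h, pvMerge]

-- the b = none instance of pvStep_eq, in the shape beta/match reduction leaves behind
theorem pvStep_none_eq (cs : List String) (x : String) :
    (if cs.contains x then
       match PySem.List.index? cs x with
       | some rank => some (rank, x)
       | none => (none : Option (Nat × String))
     else none) = pvH cs x := by
  have := pvStep_eq cs none x
  simpa [pvMerge] using this

theorem pvFoldl_merge (cs : List String) (xs : List String) :
    ∀ b : Option (Nat × String),
      xs.foldl (fun b style =>
        if cs.contains style then
          match PySem.List.index? cs style with
          | some rank =>
            match b with
            | none => some (rank, style)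
            | some (br, bs) => if rank < br then some (rank, style) else some (br, bs)
          | none => b
        else b) b
      = pvMerge b (xs.foldl (fun b style =>
          if cs.contains style then
            match PySem.List.index? cs style with
            | some rank =>
              match b with
              | none => some (rank, style)
              | some (br, bs) => if rank < br then some (rank, style) else some (br, bs)
            | none => b
          else b) none) := by
  induction xs with
  | nil => intro b; simp [pvMerge_none_right]
  | cons x xs ih =>
    intro b
    simp only [List.foldl_cons]
    rw [pvStep_eq, pvStep_none_eq]
    rw [ih (pvMerge b (pvH cs x)), ih (pvH cs x)]
    exact pvMerge_assoc _ _ _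

theorem pvFindIdx?_or (cs : List String) (p q : String → Bool) :
    cs.findIdx? (fun c => p c || q c) = pvOMin (cs.findIdx? p) (cs.findIdx? q) := by
  induction cs with
  | nil => rfl
  | cons c cs ih =>
    by_cases hp : p c = true
    · by_cases hq : q c = true
      · simp [List.findIdx?_cons, hp, hq, pvOMin]
      · simp only [List.findIdx?_cons, hp, hq, Bool.true_or, if_true, if_false]
        cases cs.findIdx? q <;> simp [pvOMin]
    · by_cases hq : q c = true
      · simp only [List.findIdx?_cons, hp, hq, Bool.false_or, if_true, if_false]
        cases cs.findIdx? p <;> simp [pvOMin]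
      · simp only [List.findIdx?_cons, hp, hq, Bool.false_or, if_false, ih]
        cases hP : cs.findIdx? p <;> cases hQ : cs.findIdx? q <;> simp [pvOMin] <;> omega

theorem pvOMin_map_merge (cs : List String) (a b : Option Nat) :
    pvMerge (a.map (fun i => (i, cs.getD i ""))) (b.map (fun i => (i, cs.getD i "")))
      = (pvOMin a b).map (fun i => (i, cs.getD i "")) := by
  rcases a with _ | i <;> rcases b with _ | j <;> simp only [Option.map_some, Option.map_none, pvMerge, pvOMin]
  by_cases h : j < i
  · simp [h, min_eq_right h.le]
  · simp [h, min_eq_left (by omega : i ≤ j)]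

theorem pvFind?_eq_findIdx?_map (cs : List String) (p : String → Bool) :
    cs.find? p = (cs.findIdx? p).map (fun i => cs.getD i "") := by
  induction cs with
  | nil => rfl
  | cons c cs ih =>
    by_cases hp : p c = true
    · simp [List.find?_cons, List.findIdx?_cons, hp]
    · cases h : cs.findIdx? p <;>
        simp [List.find?_cons, List.findIdx?_cons, hp, ih, h, List.getD_cons_succ]

theorem pvH_canon (cs : List String) (x : String) :
    pvH cs x = (cs.findIdx? (fun c => c == x)).map (fun i => (i, cs.getD i "")) := by
  unfold pvH
  rw [PySem.List.index?_eq_idxOf?, List.idxOf?]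
  cases hi : cs.findIdx? (fun c => c == x) with
  | none => simp
  | some i =>
    obtain ⟨h1, h2, -⟩ := List.findIdx?_eq_some_iff_getElem.mp hi
    have h4 : cs[i]? = some x := by
      rw [List.getElem?_eq_getElem h1]
      exact congrArg some (by simpa using h2)
    simp [List.getD_eq_getElem?_getD, h4]

-- best-of fold = leftmost minimal-rank characterisation
theorem pvBest_char (cs : List String) (xs : List String) :
    xs.foldl (fun b style =>
      if cs.contains style then
        match PySem.List.index? cs style with
        | some rank =>
          match b with
          | none => some (rank, style)
          | some (br, bs) => if rank < br then some (rank, style) else some (br, bs)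
        | none => b
      else b) none
    = (cs.findIdx? (fun c => xs.contains c)).map (fun i => (i, cs.getD i "")) := by
  induction xs with
  | nil => simp
  | cons x xs ih =>
    simp only [List.foldl_cons]
    rw [pvFoldl_merge, ih, pvStep_none_eq]
    have hpred : (fun c => (x :: xs).contains c) = (fun c => (c == x) || xs.contains c) := by
      funext c; by_cases hcx : c = x <;> simp [List.contains_cons, hcx]
    rw [hpred, pvFindIdx?_or, ← pvOMin_map_merge, ← pvH_canon]

theorem pvAlt_eq_find (desired_style : Option String) (available_styles : List String) (speaker_id : String) :
    resolve_style_py_alt desired_style available_styles speaker_id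
      = ((if speaker_id = "narrator" then NARRATOR_PREFERRED else []) ++
          (match desired_style with
           | some ds => if ds = "" then [] else ds :: PySem.Dict.getD STYLE_FALLBACK ds [ds]
           | none => [])).find? (fun c => available_styles.contains c) := by
  unfold resolve_style_py_alt
  simp only [pvBest_char]
  rw [pvFind?_eq_findIdx?_map]
  cases List.findIdx? _ _ <;> simp

theorem contains_ofList (xs : List String) (x : String) :
    PySem.Set.contains (PySem.Set.ofList xs) x = xs.contains x := by
  simp [PySem.Set.contains_eq_listContains, PySem.Set.mem_ofList]

-- ===== VERDICT (by name: the statement is the Claim_ definition above) =====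
theorem resolve_style_py_spec : Claim_equal_resolve_style_py := by
  intro d avail spk _
  unfold Spec_resolve_style_py
  rw [pvAlt_eq_find]
  unfold resolve_style_py
  by_cases he : avail = []
  · subst he
    rw [if_pos rfl]
    symm
    rw [List.find?_eq_none]
    intro a _
    simp
  · simp only [if_neg he, contains_ofList]
    by_cases hn : spk = "narrator"
    · simp only [if_pos hn, List.find?_append]
      cases hfind : NARRATOR_PREFERRED.find? (fun pref => avail.contains pref) with
      | some p => simp [hfind]
      | none =>
        simp only [hfind, Option.none_or]
        cases d with
        | none => simp
        | some ds =>
          by_cases hds : ds = ""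
          · simp [hds]
          · simp [hds, List.find?_cons]
            split <;> simp_all
    · simp only [if_neg hn, List.nil_append]
      cases d with
      | none => simp
      | some ds =>
        by_cases hds : ds = ""
        · simp [hds]
        · simp [hds, List.find?_cons]
          split <;> simp_all
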